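-- pv_equiv track=rewrite | github.com/SambaHFall/EtudeFrInclusif | for_me/graph_words.py | facts
-- ===== SOURCE A (Python) =====
-- def facts(wd) :
-- 	if len(wd) <= 1 :
-- 		return [wd]
-- 	else :
-- 		res = []
-- 		for i in range(1, len(wd)) :
-- 			res.append(wd[0:i])
-- 		return res + facts(wd[1:])
-- ===== SOURCE B (Python) =====
-- def facts(wd):
--     if len(wd) <= 1:
--         return [wd]
--     n = len(wd)
--     res = []
--     for k in range(n - 1):
--         for i in range(1, n - k):
--             res.append(wd[k:k+i])
--     res.append(wd[n-1:])
--     return res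
-- ===== Notes on version B (the rewrite author's own statement) =====
-- stated objective: faster
-- what changed: Replaces the suffix recursion with repeated result-list concatenation by a single iterative nested loop over start index and prefix length, appending each substring once into one accumulator list.
import Mathlib
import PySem

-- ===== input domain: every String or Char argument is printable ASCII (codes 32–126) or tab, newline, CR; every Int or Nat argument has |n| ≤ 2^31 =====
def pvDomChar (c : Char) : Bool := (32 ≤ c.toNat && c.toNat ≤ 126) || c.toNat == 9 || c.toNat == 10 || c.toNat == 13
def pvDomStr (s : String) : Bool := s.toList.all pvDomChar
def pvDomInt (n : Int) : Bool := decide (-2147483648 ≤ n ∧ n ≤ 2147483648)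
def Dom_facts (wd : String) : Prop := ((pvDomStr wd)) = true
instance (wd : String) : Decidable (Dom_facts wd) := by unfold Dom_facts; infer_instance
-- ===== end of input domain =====

-- B replaces A's suffix recursion (with repeated list concatenation) by one iterative
-- nested loop over start index and prefix length; same substrings in the same order.

-- ===== PORT A =====
-- A's recursion, on the character list of the string (wd[0:i] and wd[1:] are slices).
def factsA (cs : List Char) : List String :=
  if cs.length ≤ 1 then [String.ofList cs]
  else
    ((PySem.List.pyRange 1 (cs.length : Int) 1).foldl
        (fun res i => res ++ [String.ofList (PySem.List.slice cs (some 0) (some i))]) [])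
      ++ factsA (PySem.List.slice cs (some 1) none)
termination_by cs.length
decreasing_by simp [PySem.List.slice_from_one]; omega

def facts (wd : String) : List String := factsA wd.toList

-- ===== PORT B =====
def facts_alt (wd : String) : List String :=
  if wd.toList.length ≤ 1 then [wd]
  else
    let cs := wd.toList
    let n : Int := cs.length
    ((PySem.List.pyRange 0 (n - 1) 1).foldl
        (fun res k =>
          (PySem.List.pyRange 1 (n - k) 1).foldl
            (fun res i => res ++ [String.ofList (PySem.List.slice cs (some k) (some (k + i)))]) res)
        [])
      ++ [String.ofList (PySem.List.slice cs (some (n - 1)) none)]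

-- ===== PRECONDITION & SPEC =====
def Spec_facts (wd : String) (out : List String) : Prop := out = facts_alt wd
instance (wd : String) (out : List String) : Decidable (Spec_facts wd out) := by unfold Spec_facts; infer_instance

-- ===== CLAIM (what is proved, stated in full; the proofs are below) =====
def Claim_equal_facts : Prop := ∀ (wd : String), Dom_facts wd → Spec_facts wd (facts wd)

-- ===== LEMMAS AND PROOFS =====

-- closed form both ports are reduced to
def pvBody (cs : List Char) (k : Nat) : List String :=
  (List.range (cs.length - 1 - k)).map (fun i => String.ofList ((cs.drop k).take (i + 1)))

def pvClosed (cs : List Char) : List String :=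
  (List.range (cs.length - 1)).flatMap (pvBody cs) ++ [String.ofList (cs.drop (cs.length - 1))]

theorem pv_foldl_app {α β : Type} (g : α → List β) :
    ∀ (l : List α) (init : List β),
      l.foldl (fun r x => r ++ g x) init = init ++ l.flatMap g := by
  intro l
  induction l with
  | nil => simp
  | cons x xs ih => intro init; simp [ih]

theorem pvBody_succ (cs : List Char) (k : Nat) :
    pvBody cs (k + 1) = pvBody cs.tail k := by
  unfold pvBody
  have h1 : cs.tail.length - 1 - k = cs.length - 1 - (k + 1) := by
    simp only [List.length_tail]; omega
  have h2 : cs.tail.drop k = cs.drop (k + 1) := by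
    rw [← List.drop_one, List.drop_drop]; ring_nf
  rw [h1, h2]

theorem pvClosed_base (cs : List Char) (h : cs.length ≤ 1) :
    pvClosed cs = [String.ofList cs] := by
  unfold pvClosed
  have h1 : cs.length - 1 = 0 := by omega
  simp [h1]

theorem pvClosed_step (cs : List Char) (h : 2 ≤ cs.length) :
    pvClosed cs = pvBody cs 0 ++ pvClosed cs.tail := by
  unfold pvClosed
  have h1 : cs.length - 1 = (cs.length - 2) + 1 := by omega
  rw [h1, List.range_succ_eq_map]
  simp only [List.flatMap_cons, List.flatMap_map, pvBody_succ, List.append_assoc]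
  have h2 : cs.tail.length - 1 = cs.length - 2 := by simp only [List.length_tail]; omega
  have h5 : cs.tail.drop (cs.length - 2) = cs.drop (cs.length - 1) := by
    rw [← List.drop_one, List.drop_drop]; congr 1; omega
  have h6 : cs.length - 2 + 1 = cs.length - 1 := by omega
  have h7 : cs.length - 1 - 1 = cs.length - 2 := by omega
  simp only [List.length_tail, h7, h6, h5]

theorem pv_flatMap_singleton {α β : Type} (g : α → β) :
    ∀ (l : List α), l.flatMap (fun x => [g x]) = l.map g := by
  intro l
  induction l with
  | nil => rfl
  | cons x xs ih => simp [ih]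

theorem factsA_loop (cs : List Char) :
    ((PySem.List.pyRange 1 (cs.length : Int) 1).foldl
        (fun res i => res ++ [String.ofList (PySem.List.slice cs (some 0) (some i))]) [])
      = pvBody cs 0 := by
  rw [pv_foldl_app, PySem.List.pyRange_one]
  have hm : (((cs.length : Int)) - 1).toNat = cs.length - 1 := by omega
  unfold pvBody
  simp only [hm, List.flatMap_map, List.nil_append, Nat.sub_zero, List.drop_zero]
  rw [pv_flatMap_singleton]
  apply List.map_congr_left
  intro k hk
  have hc : (1 + (k : Int)) = (((k + 1 : Nat)) : Int) := by push_cast; ring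
  rw [PySem.List.slice_zero_start, hc, PySem.List.slice_to_natCast]

theorem factsA_closed : ∀ (cs : List Char), factsA cs = pvClosed cs := by
  have key : ∀ n (cs : List Char), cs.length ≤ n → factsA cs = pvClosed cs := by
    intro n
    induction n with
    | zero =>
      intro cs h
      have h1 : cs.length ≤ 1 := by omega
      rw [factsA, if_pos h1, pvClosed_base cs h1]
    | succ n ih =>
      intro cs h
      by_cases h1 : cs.length ≤ 1
      · rw [factsA, if_pos h1, pvClosed_base cs h1]
      · rw [factsA, if_neg h1, PySem.List.slice_from_one, factsA_loop,
            ih cs.tail (by simp [List.length_tail]; omega),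
            pvClosed_step cs (by omega)]
  intro cs; exact key cs.length cs le_rfl

theorem facts_alt_closed (wd : String) : facts_alt wd = pvClosed wd.toList := by
  unfold facts_alt
  by_cases h1 : wd.toList.length ≤ 1
  · rw [if_pos h1, pvClosed_base _ h1, String.ofList_toList]
  · rw [if_neg h1]
    simp only [pv_foldl_app, List.nil_append]
    rw [PySem.List.pyRange_one]
    unfold pvClosed pvBody
    simp only [List.flatMap_map]
    congr 1
    · rw [show (((wd.toList.length : Int)) - 1 - 0).toNat = wd.toList.length - 1 by omega]
      congr 1
      funext j
      rw [PySem.List.pyRange_one]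
      simp only [List.flatMap_map]
      rw [pv_flatMap_singleton]
      rw [show (((wd.toList.length : Int)) - (0 + (j : Int)) - 1).toNat
            = wd.toList.length - 1 - j by omega]
      apply List.map_congr_left
      intro t ht
      simp only [zero_add]
      rw [show ((1 : Int) + (t : Int)) = (((t + 1 : Nat)) : Int) by push_cast; ring,
          PySem.List.slice_natCast_add]
    · rw [show (((wd.toList.length : Int)) - 1) = (((wd.toList.length - 1 : Nat)) : Int) by omega,
          PySem.List.slice_from_natCast]

-- ===== VERDICT (by name: the statement is the Claim_ definition above) =====
theorem facts_spec : Claim_equal_facts := by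
  intro wd _
  unfold Spec_facts facts
  rw [factsA_closed, facts_alt_closed]
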